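-- pv_equiv track=rewrite | github.com/CoffEAM/ege | ДЗ/ДЗ-18-04-25/Task-15-16262.py | f
-- ===== SOURCE A (Python) =====
-- def f(a):
--     for x in range(-300, 300):
--         for y in range(-300, 300):
--             u = ((a < x) or (x ** 2 - 7 * x + 10 > 0)) and \
--                 ((a >= y) or (y ** 2 + 7 * y + 12 > 0))
--             if not u:
--                 return False
--     return True
-- ===== SOURCE B (Python) =====
-- def f(a):
--     # x**2-7*x+10 <= 0 exactly for x in [2,5]; there the condition forces a < x, tightest at x = 2.
--     # y**2+7*y+12 <= 0 exactly for y in [-4,-3]; there the condition forces a >= y, tightest at y = -3.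
--     return -3 <= a < 2
-- ===== Notes on version B (the rewrite author's own statement) =====
-- stated objective: faster
-- what changed: Replaced the 600x600 brute-force grid scan with the closed-form condition -3 <= a < 2 obtained by solving the two quadratics for their non-positive regions.
import Mathlib
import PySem

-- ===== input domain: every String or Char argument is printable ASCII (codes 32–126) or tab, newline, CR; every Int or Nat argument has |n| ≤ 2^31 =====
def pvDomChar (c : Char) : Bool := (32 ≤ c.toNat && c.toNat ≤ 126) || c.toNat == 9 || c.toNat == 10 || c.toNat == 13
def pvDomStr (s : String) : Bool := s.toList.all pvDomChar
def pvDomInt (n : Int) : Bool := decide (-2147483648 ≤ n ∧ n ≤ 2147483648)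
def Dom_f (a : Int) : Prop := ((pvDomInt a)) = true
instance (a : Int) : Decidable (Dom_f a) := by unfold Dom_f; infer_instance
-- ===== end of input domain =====

-- B replaces the 600×600 grid scan by the closed form -3 ≤ a < 2 (faster by a large constant factor).

-- ===== PORT A =====
-- inner loop over y: first failing pair returns False
def fInnerA (a x : Int) : List Int → Bool
  | [] => true
  | y :: ys =>
      let u := (decide (a < x) || decide (x ^ 2 - 7 * x + 10 > 0)) &&
               (decide (a ≥ y) || decide (y ^ 2 + 7 * y + 12 > 0))
      if !u then false else fInnerA a x ys

-- outer loop over x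
def fOuterA (a : Int) : List Int → Bool
  | [] => true
  | x :: xs => if fInnerA a x (PySem.List.pyRange (-300) 300 1) then fOuterA a xs else false

def f (a : Int) : Bool := fOuterA a (PySem.List.pyRange (-300) 300 1)

-- ===== PORT B =====
def f_alt (a : Int) : Bool := decide (-3 ≤ a) && decide (a < 2)

-- ===== PRECONDITION & SPEC =====
def Spec_f (a : Int) (out : Bool) : Prop := out = f_alt a
instance (a : Int) (out : Bool) : Decidable (Spec_f a out) := by unfold Spec_f; infer_instance

-- ===== CLAIM (what is proved, stated in full; the proofs are below) =====
def Claim_equal_f : Prop := ∀ (a : Int), Dom_f a → Spec_f a (f a)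

-- ===== LEMMAS AND PROOFS =====

def fPred (a x y : Int) : Bool :=
  (decide (a < x) || decide (x ^ 2 - 7 * x + 10 > 0)) &&
  (decide (a ≥ y) || decide (y ^ 2 + 7 * y + 12 > 0))

theorem fInnerA_eq_all (a x : Int) (ys : List Int) :
    fInnerA a x ys = ys.all (fun y => fPred a x y) := by
  induction ys with
  | nil => rfl
  | cons y t ih =>
      simp only [fInnerA, fPred, List.all_cons, ih]
      cases hu : ((decide (a < x) || decide (x ^ 2 - 7 * x + 10 > 0)) &&
               (decide (a ≥ y) || decide (y ^ 2 + 7 * y + 12 > 0))) <;> simp [hu]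

theorem fOuterA_eq_all (a : Int) (xs : List Int) :
    fOuterA a xs = xs.all (fun x => fInnerA a x (PySem.List.pyRange (-300) 300 1)) := by
  induction xs with
  | nil => rfl
  | cons x t ih =>
      simp only [fOuterA, List.all_cons, ih]
      cases hf : fInnerA a x (PySem.List.pyRange (-300) 300 1) <;> simp [hf]

theorem fPred_true_of (a x y : Int) (h1 : -3 ≤ a) (h2 : a < 2) : fPred a x y = true := by
  simp only [fPred, Bool.and_eq_true, Bool.or_eq_true, decide_eq_true_eq]
  constructor
  · by_cases hx : x ^ 2 - 7 * x + 10 > 0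
    · exact Or.inr hx
    · left
      rw [not_lt] at hx
      have : 2 ≤ x := by nlinarith [sq_nonneg (2 * x - 7)]
      omega
  · by_cases hy : y ^ 2 + 7 * y + 12 > 0
    · exact Or.inr hy
    · left
      rw [not_lt] at hy
      have : y ≤ -3 := by nlinarith [sq_nonneg (2 * y + 7)]
      omega

-- ===== VERDICT (by name: the statement is the Claim_ definition above) =====
theorem f_spec : Claim_equal_f := by
  intro a _
  unfold Spec_f f f_alt
  rw [fOuterA_eq_all]
  by_cases hc : -3 ≤ a ∧ a < 2
  · have hall : ∀ x ∈ PySem.List.pyRange (-300) 300 1,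
        fInnerA a x (PySem.List.pyRange (-300) 300 1) = true := by
      intro x _
      rw [fInnerA_eq_all]
      simp only [List.all_eq_true]
      intro y _
      exact fPred_true_of a x y hc.1 hc.2
    simp [List.all_eq_true.mpr hall, hc.1, hc.2]
  · have hmem : ∀ z : Int, -300 ≤ z → z < 300 → z ∈ PySem.List.pyRange (-300) 300 1 := by
      intro z h1 h2
      rw [PySem.List.mem_pyRange_one]
      omega
    have hfail : ¬ (PySem.List.pyRange (-300) 300 1).all
        (fun x => fInnerA a x (PySem.List.pyRange (-300) 300 1)) = true := by
      intro hall
      rw [List.all_eq_true] at hall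
      rcases not_and_or.mp hc with h | h
      · -- a < -3 : pick x = 0, y = -3
        have := hall 0 (hmem 0 (by norm_num) (by norm_num))
        rw [fInnerA_eq_all, List.all_eq_true] at this
        have := this (-3) (hmem (-3) (by norm_num) (by norm_num))
        simp only [fPred, Bool.and_eq_true, Bool.or_eq_true, decide_eq_true_eq] at this
        rcases this.2 with h2 | h2 <;> omega
      · -- a ≥ 2 : pick x = 2, y = 0
        have := hall 2 (hmem 2 (by norm_num) (by norm_num))
        rw [fInnerA_eq_all, List.all_eq_true] at this
        have := this 0 (hmem 0 (by norm_num) (by norm_num))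
        simp only [fPred, Bool.and_eq_true, Bool.or_eq_true, decide_eq_true_eq] at this
        rcases this.1 with h1 | h1 <;> omega
    rcases Bool.eq_false_or_eq_true ((PySem.List.pyRange (-300) 300 1).all
        (fun x => fInnerA a x (PySem.List.pyRange (-300) 300 1))) with hb | hb
    · exact absurd hb hfail
    · rw [hb]
      rcases not_and_or.mp hc with h | h <;> simp [h]
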